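-- pv_equiv track=rewrite | github.com/fredrikljung93/advent-of-code-2020 | day5.py | helper
-- ===== SOURCE A (Python) =====
-- def helper(mi, ma, lower_half_char, s):
--     range_width = ma - mi
--     if len(s) == 0:
--         return mi
--     if s[0] == lower_half_char:
--         return helper(mi, (ma - range_width // 2 - 1), lower_half_char, s[1:])
--     else:
--         return helper((mi + range_width // 2 + 1), ma, lower_half_char, s[1:])
-- ===== SOURCE B (Python) =====
-- def helper(mi, ma, lower_half_char, s):
--     lo, hi = mi, ma
--     for c in s:
--         rw = hi - lo
--         if c == lower_half_char:
--             hi = hi - rw // 2 - 1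
--         else:
--             lo = lo + rw // 2 + 1
--     return lo
-- ===== Notes on version B (the rewrite author's own statement) =====
-- stated objective: faster
-- what changed: Replaces the tail recursion (which rebuilds a sliced string on each call) with a single iterative loop threading a (lo, hi) pair over the characters and returning lo.
import Mathlib
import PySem

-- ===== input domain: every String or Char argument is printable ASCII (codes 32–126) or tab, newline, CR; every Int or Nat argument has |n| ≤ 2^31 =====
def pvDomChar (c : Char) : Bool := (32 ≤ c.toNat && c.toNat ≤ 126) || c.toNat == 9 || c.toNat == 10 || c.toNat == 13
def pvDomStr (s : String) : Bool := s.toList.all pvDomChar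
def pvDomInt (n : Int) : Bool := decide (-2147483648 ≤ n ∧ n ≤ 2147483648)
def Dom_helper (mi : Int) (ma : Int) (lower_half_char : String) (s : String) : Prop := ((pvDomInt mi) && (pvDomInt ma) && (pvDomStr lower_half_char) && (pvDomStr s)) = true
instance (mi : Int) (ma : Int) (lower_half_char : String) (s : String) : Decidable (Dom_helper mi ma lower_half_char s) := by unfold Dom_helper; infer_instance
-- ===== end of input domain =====

-- B replaces A's tail recursion (which re-slices the string each call) by one
-- iterative fold threading a (lo, hi) pair over the characters; return value only.

-- ===== PORT A =====
-- A's recursion, on the string's character list; s[0] is the head, s[1:] the tail.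
def helperRec (mi : Int) (ma : Int) (lower_half_char : String) : List Char → Int
  | [] => mi
  | ch :: rest =>
    let range_width := ma - mi
    if String.mk [ch] = lower_half_char then
      helperRec mi (ma - PySem.Int.floordiv range_width 2 - 1) lower_half_char rest
    else
      helperRec (mi + PySem.Int.floordiv range_width 2 + 1) ma lower_half_char rest

def helper (mi : Int) (ma : Int) (lower_half_char : String) (s : String) : Int :=
  helperRec mi ma lower_half_char s.toList

-- ===== PORT B =====
-- B's loop body: one step of the (lo, hi) narrowing.
def helperStep (lower_half_char : String) (p : Int × Int) (ch : Char) : Int × Int :=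
  let rw := p.2 - p.1
  if String.mk [ch] = lower_half_char then
    (p.1, p.2 - PySem.Int.floordiv rw 2 - 1)
  else
    (p.1 + PySem.Int.floordiv rw 2 + 1, p.2)

def helper_alt (mi : Int) (ma : Int) (lower_half_char : String) (s : String) : Int :=
  (s.toList.foldl (helperStep lower_half_char) (mi, ma)).1

-- ===== PRECONDITION & SPEC =====
def Spec_helper (mi : Int) (ma : Int) (lower_half_char : String) (s : String) (out : Int) : Prop := out = helper_alt mi ma lower_half_char s
instance (mi : Int) (ma : Int) (lower_half_char : String) (s : String) (out : Int) : Decidable (Spec_helper mi ma lower_half_char s out) := by unfold Spec_helper; infer_instance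

-- ===== CLAIM (what is proved, stated in full; the proofs are below) =====
def Claim_equal_helper : Prop := ∀ (mi : Int) (ma : Int) (lower_half_char : String) (s : String), Dom_helper mi ma lower_half_char s → Spec_helper mi ma lower_half_char s (helper mi ma lower_half_char s)

-- ===== LEMMAS AND PROOFS =====
theorem helperRec_eq_foldl (l : List Char) (mi ma : Int) (c : String) :
    helperRec mi ma c l = (l.foldl (helperStep c) (mi, ma)).1 := by
  induction l generalizing mi ma with
  | nil => simp [helperRec]
  | cons ch rest ih =>
    simp only [helperRec, List.foldl_cons, helperStep]
    split_ifs with h <;> simp [h, ih]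

-- ===== VERDICT (by name: the statement is the Claim_ definition above) =====
theorem helper_spec : Claim_equal_helper := by
  intro mi ma c s _
  unfold Spec_helper helper helper_alt
  exact helperRec_eq_foldl _ _ _ _
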